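-- pv_equiv track=rewrite | github.com/rethinsilvester/wfo-tracker | app.py | sort_months_chronologically
-- ===== SOURCE A (Python) =====
-- def sort_months_chronologically(month_names):
--     """Sort month names in chronological order"""
--     month_order = {
--         'jan': 1, 'feb': 2, 'mar': 3, 'apr': 4, 'may': 5, 'jun': 6,
--         'jul': 7, 'aug': 8, 'sep': 9, 'oct': 10, 'nov': 11, 'dec': 12,
--         'january': 1, 'february': 2, 'march': 3, 'april': 4,
--         'june': 6, 'july': 7, 'august': 8, 'september': 9,
--         'october': 10, 'november': 11, 'december': 12
--     }
--
--     def get_month_number(month_name):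
--         words = month_name.lower().split()
--         for word in words:
--             if word in month_order:
--                 return month_order[word]
--         return 0
--
--     return sorted(month_names, key=get_month_number)
-- ===== SOURCE B (Python) =====
-- MONTHS = [('jan', 'january'), ('feb', 'february'), ('mar', 'march'),
--           ('apr', 'april'), ('may', 'may'), ('jun', 'june'),
--           ('jul', 'july'), ('aug', 'august'), ('sep', 'september'),
--           ('oct', 'october'), ('nov', 'november'), ('dec', 'december')]
--
--
-- def _month_number(month_name):
--     for word in month_name.lower().split():
--         for i, (abbr, full) in enumerate(MONTHS):
--             if word == abbr or word == full:
--                 return i + 1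
--     return 0
--
--
-- def sort_months_chronologically(month_names):
--     """Sort month names chronologically by stable selection of each key 0..12"""
--     keyed = [(_month_number(name), name) for name in month_names]
--     return [name for k in range(13) for (kn, name) in keyed if kn == k]
-- ===== Notes on version B (the rewrite author's own statement) =====
-- stated objective: alternative
-- what changed: Replaces the comparison sort with a stable key-selection sort: keys are precomputed once from an ordered list of (abbrev, fullname) pairs instead of a dict, then the output is built by 13 filtering passes selecting the names with key 0,1,...,12 in turn.
import Mathlib
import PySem

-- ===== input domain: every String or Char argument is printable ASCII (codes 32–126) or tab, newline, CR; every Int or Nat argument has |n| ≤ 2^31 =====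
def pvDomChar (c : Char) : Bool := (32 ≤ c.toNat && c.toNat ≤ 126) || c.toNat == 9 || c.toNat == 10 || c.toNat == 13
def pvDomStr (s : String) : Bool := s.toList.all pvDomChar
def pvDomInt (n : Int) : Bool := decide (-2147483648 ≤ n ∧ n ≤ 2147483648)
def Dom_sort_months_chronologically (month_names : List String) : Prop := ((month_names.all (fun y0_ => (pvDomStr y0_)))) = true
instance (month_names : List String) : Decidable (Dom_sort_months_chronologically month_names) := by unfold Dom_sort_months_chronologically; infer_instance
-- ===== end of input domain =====

-- B replaces A's comparison sort (sorted with a dict-lookup key) by a stable key-selection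
-- sort: keys 0..12 are precomputed from an ordered list of (abbrev, fullname) pairs, then the
-- output is built by 13 filtering passes selecting each key value in turn (no speed claim).

-- ===== PORT A =====
-- the month_order dict literal of Source A
def monthOrder : PySem.Dict String Int := PySem.Dict.ofList
  [("jan", 1), ("feb", 2), ("mar", 3), ("apr", 4), ("may", 5), ("jun", 6),
   ("jul", 7), ("aug", 8), ("sep", 9), ("oct", 10), ("nov", 11), ("dec", 12),
   ("january", 1), ("february", 2), ("march", 3), ("april", 4),
   ("june", 6), ("july", 7), ("august", 8), ("september", 9),
   ("october", 10), ("november", 11), ("december", 12)]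

-- 'for word in words: if word in month_order: return month_order[word]' / 'return 0'
def firstMonthNumber : List String → Int
  | [] => 0
  | w :: ws => if monthOrder.contains w then monthOrder.getD w 0 else firstMonthNumber ws

-- get_month_number of Source A
def getMonthNumber (month_name : String) : Int :=
  firstMonthNumber (PySem.Str.split₀ (PySem.Str.lower month_name))

def sort_months_chronologically (month_names : List String) : List String :=
  PySem.List.sorted month_names getMonthNumber

-- ===== PORT B =====
-- the MONTHS constant of Source B
def monthPairs : List (String × String) :=
  [("jan", "january"), ("feb", "february"), ("mar", "march"),
   ("apr", "april"), ("may", "may"), ("jun", "june"),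
   ("jul", "july"), ("aug", "august"), ("sep", "september"),
   ("oct", "october"), ("nov", "november"), ("dec", "december")]

-- 'for i, (abbr, full) in enumerate(MONTHS): if word == abbr or word == full: return i + 1'
def scanPairs (word : String) : List (Int × (String × String)) → Option Int
  | [] => none
  | (i, (abbr, full)) :: rest =>
      if word == abbr || word == full then some (i + 1) else scanPairs word rest

-- outer 'for word in …' loop of _month_number
def altWordsNumber : List String → Int
  | [] => 0
  | w :: ws =>
      match scanPairs w (PySem.List.enumerate monthPairs) with
      | some n => n
      | none => altWordsNumber ws

-- _month_number of Source B
def altMonthNumber (month_name : String) : Int :=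
  altWordsNumber (PySem.Str.split₀ (PySem.Str.lower month_name))

def sort_months_chronologically_alt (month_names : List String) : List String :=
  let keyed := month_names.map (fun name => (altMonthNumber name, name))
  (PySem.List.pyRange 0 13 1).flatMap
    (fun k => (keyed.filter (fun p => p.1 == k)).map (fun p => p.2))

-- ===== PRECONDITION & SPEC =====
def Spec_sort_months_chronologically (month_names : List String) (out : List String) : Prop := out = sort_months_chronologically_alt month_names
instance (month_names : List String) (out : List String) : Decidable (Spec_sort_months_chronologically month_names out) := by unfold Spec_sort_months_chronologically; infer_instance

-- ===== CLAIM (what is proved, stated in full; the proofs are below) =====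
def Claim_equal_sort_months_chronologically : Prop := ∀ (month_names : List String), Dom_sort_months_chronologically month_names → Spec_sort_months_chronologically month_names (sort_months_chronologically month_names)

-- ===== LEMMAS AND PROOFS =====

-- B's pair scan agrees word-for-word with A's dict lookup
set_option maxHeartbeats 1000000 in
theorem scanPairs_eq_lookup (w : String) :
    scanPairs w (PySem.List.enumerate monthPairs) =
      (if monthOrder.contains w then some (monthOrder.getD w 0) else none) := by
  have hmk : monthOrder = PySem.Dict.mk
    [("jan", 1), ("feb", 2), ("mar", 3), ("apr", 4), ("may", 5), ("jun", 6),
     ("jul", 7), ("aug", 8), ("sep", 9), ("oct", 10), ("nov", 11), ("dec", 12),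
     ("january", 1), ("february", 2), ("march", 3), ("april", 4),
     ("june", 6), ("july", 7), ("august", 8), ("september", 9),
     ("october", 10), ("november", 11), ("december", 12)] := by decide
  rw [hmk]
  by_cases h1 : w = "jan"
  · subst h1; decide
  by_cases h2 : w = "feb"
  · subst h2; decide
  by_cases h3 : w = "mar"
  · subst h3; decide
  by_cases h4 : w = "apr"
  · subst h4; decide
  by_cases h5 : w = "may"
  · subst h5; decide
  by_cases h6 : w = "jun"
  · subst h6; decide
  by_cases h7 : w = "jul"
  · subst h7; decide
  by_cases h8 : w = "aug"
  · subst h8; decide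
  by_cases h9 : w = "sep"
  · subst h9; decide
  by_cases h10 : w = "oct"
  · subst h10; decide
  by_cases h11 : w = "nov"
  · subst h11; decide
  by_cases h12 : w = "dec"
  · subst h12; decide
  by_cases h13 : w = "january"
  · subst h13; decide
  by_cases h14 : w = "february"
  · subst h14; decide
  by_cases h15 : w = "march"
  · subst h15; decide
  by_cases h16 : w = "april"
  · subst h16; decide
  by_cases h17 : w = "june"
  · subst h17; decide
  by_cases h18 : w = "july"
  · subst h18; decide
  by_cases h19 : w = "august"
  · subst h19; decide
  by_cases h20 : w = "september"
  · subst h20; decide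
  by_cases h21 : w = "october"
  · subst h21; decide
  by_cases h22 : w = "november"
  · subst h22; decide
  by_cases h23 : w = "december"
  · subst h23; decide
  have g1 : "jan" ≠ w := Ne.symm h1
  have g2 : "feb" ≠ w := Ne.symm h2
  have g3 : "mar" ≠ w := Ne.symm h3
  have g4 : "apr" ≠ w := Ne.symm h4
  have g5 : "may" ≠ w := Ne.symm h5
  have g6 : "jun" ≠ w := Ne.symm h6
  have g7 : "jul" ≠ w := Ne.symm h7
  have g8 : "aug" ≠ w := Ne.symm h8
  have g9 : "sep" ≠ w := Ne.symm h9
  have g10 : "oct" ≠ w := Ne.symm h10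
  have g11 : "nov" ≠ w := Ne.symm h11
  have g12 : "dec" ≠ w := Ne.symm h12
  have g13 : "january" ≠ w := Ne.symm h13
  have g14 : "february" ≠ w := Ne.symm h14
  have g15 : "march" ≠ w := Ne.symm h15
  have g16 : "april" ≠ w := Ne.symm h16
  have g17 : "june" ≠ w := Ne.symm h17
  have g18 : "july" ≠ w := Ne.symm h18
  have g19 : "august" ≠ w := Ne.symm h19
  have g20 : "september" ≠ w := Ne.symm h20
  have g21 : "october" ≠ w := Ne.symm h21
  have g22 : "november" ≠ w := Ne.symm h22
  have g23 : "december" ≠ w := Ne.symm h23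
  simp [scanPairs, PySem.List.enumerate, monthPairs, PySem.Dict.contains_mk, h1, h2, h3, h4, h5, h6, h7, h8, h9, h10, h11, h12, h13, h14, h15, h16, h17, h18, h19, h20, h21, h22, h23, g1, g2, g3, g4, g5, g6, g7, g8, g9, g10, g11, g12, g13, g14, g15, g16, g17, g18, g19, g20, g21, g22, g23]

-- the two key functions coincide
theorem altMonthNumber_eq (s : String) : altMonthNumber s = getMonthNumber s := by
  unfold altMonthNumber getMonthNumber
  induction PySem.Str.split₀ (PySem.Str.lower s) with
  | nil => rfl
  | cons w ws ih =>
    simp only [altWordsNumber, firstMonthNumber, scanPairs_eq_lookup]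
    by_cases h : monthOrder.contains w <;> simp [h, ih]

-- the key is always in 0..12
theorem getMonthNumber_bound (s : String) :
    0 ≤ getMonthNumber s ∧ getMonthNumber s ≤ 12 := by
  unfold getMonthNumber
  induction PySem.Str.split₀ (PySem.Str.lower s) with
  | nil => simp [firstMonthNumber]
  | cons w ws ih =>
    by_cases h : monthOrder.contains w
    · simp only [firstMonthNumber, h, if_true]
      rcases ho : monthOrder.get? w with _ | v
      · rw [PySem.Dict.get?_eq_none_iff_contains] at ho
        simp [ho] at h
      · rw [PySem.Dict.getD_of_get?_eq_some _ _ ho]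
        have hmem : (w, v) ∈ monthOrder.items :=
          ((PySem.Dict.get?_eq_some_iff_mem_items monthOrder w v (by decide)).mp ho)
        have hv : v ∈ monthOrder.items.map Prod.snd := List.mem_map_of_mem hmem
        have hall : ∀ x ∈ monthOrder.items.map Prod.snd, 0 ≤ x ∧ x ≤ 12 := by decide
        exact hall v hv
    · simpa [firstMonthNumber, h] using ih

-- the bucket of key j inside p
def keyBucket (p : List String) (j : Nat) : List String :=
  p.filter (fun s => decide (getMonthNumber s = (j : Int)))

-- all 13 buckets glued together, in key order
def flatBuckets (p : List String) : List String :=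
  ((List.range 13).map (keyBucket p)).flatten

theorem keyBucket_append (p : List String) (x : String) (j : Nat) :
    keyBucket (p ++ [x]) j =
      keyBucket p j ++ (if getMonthNumber x = (j : Int) then [x] else []) := by
  simp only [keyBucket, List.filter_append, List.filter_cons, List.filter_nil]
  split_ifs with h h1 h2 <;> simp_all

theorem mem_keyBucket {p : List String} {j : Nat} {a : String}
    (h : a ∈ keyBucket p j) : getMonthNumber a = (j : Int) := by
  simp only [keyBucket, List.mem_filter, decide_eq_true_eq] at h
  exact h.2

theorem insertBy_append_of_not {α : Type} (before : α → α → Bool) (x : α)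
    (l₁ l₂ : List α) (h : ∀ a ∈ l₁, before x a = false) :
    PySem.List.insertBy before x (l₁ ++ l₂) = l₁ ++ PySem.List.insertBy before x l₂ := by
  induction l₁ with
  | nil => simp
  | cons y ys ih =>
    simp only [List.cons_append, PySem.List.insertBy, h y (by simp)]
    simp only [Bool.false_eq_true, if_false, List.cons.injEq, true_and]
    exact ih (fun a ha => h a (by simp [ha]))

theorem insertBy_of_all_before {α : Type} (before : α → α → Bool) (x : α)
    (l : List α) (h : ∀ a ∈ l, before x a = true) :
    PySem.List.insertBy before x l = x :: l := by
  cases l with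
  | nil => rfl
  | cons y ys => simp [PySem.List.insertBy, h y (by simp)]

-- one step of A's insertion sort preserves the bucket decomposition
set_option maxHeartbeats 1000000 in
theorem insert_step (p : List String) (x : String) :
    PySem.List.insertBy (fun a b => decide (getMonthNumber a < getMonthNumber b)) x
        (flatBuckets p) = flatBuckets (p ++ [x]) := by
  obtain ⟨h0, h12⟩ := getMonthNumber_bound x
  set k : Int := getMonthNumber x with hk
  have hsplit : (13 : Nat) = (k.toNat + 1) + (12 - k.toNat) := by omega
  have hrange : List.range 13 =
      List.range (k.toNat + 1) ++ (List.range (12 - k.toNat)).map (fun i => (k.toNat + 1) + i) := by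
    rw [hsplit, List.range_add]
  have hdecomp : ∀ q : List String, flatBuckets q =
      ((List.range (k.toNat + 1)).map (keyBucket q)).flatten ++
      (((List.range (12 - k.toNat)).map (fun i => (k.toNat + 1) + i)).map (keyBucket q)).flatten := by
    intro q
    simp only [flatBuckets]
    rw [hrange, List.map_append, List.flatten_append]
  have hLo : ∀ a ∈ ((List.range (k.toNat + 1)).map (keyBucket p)).flatten,
      (fun a b => decide (getMonthNumber a < getMonthNumber b)) x a = false := by
    intro a ha
    simp only [List.mem_flatten, List.mem_map] at ha
    obtain ⟨l, ⟨j, hj, rfl⟩, hal⟩ := ha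
    have := mem_keyBucket hal
    simp only [List.mem_range] at hj
    simp only [decide_eq_false_iff_not, not_lt]
    omega
  have hHi : ∀ a ∈ (((List.range (12 - k.toNat)).map (fun i => (k.toNat + 1) + i)).map (keyBucket p)).flatten,
      (fun a b => decide (getMonthNumber a < getMonthNumber b)) x a = true := by
    intro a ha
    simp only [List.mem_flatten, List.mem_map] at ha
    obtain ⟨l, ⟨j, ⟨i, hi, rfl⟩, rfl⟩, hal⟩ := ha
    have := mem_keyBucket hal
    simp only [decide_eq_true_eq]
    omega
  rw [hdecomp p, insertBy_append_of_not _ _ _ _ hLo, insertBy_of_all_before _ _ _ hHi,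
      hdecomp (p ++ [x])]
  have hkb : ∀ j : Nat, j ≠ k.toNat → keyBucket (p ++ [x]) j = keyBucket p j := by
    intro j hj
    rw [keyBucket_append]
    have : ¬ getMonthNumber x = (j : Int) := by omega
    simp [this]
  have hL2 : ((List.range (12 - k.toNat)).map (fun i => (k.toNat + 1) + i)).map (keyBucket (p ++ [x])) =
      ((List.range (12 - k.toNat)).map (fun i => (k.toNat + 1) + i)).map (keyBucket p) := by
    apply List.map_congr_left
    intro j hj
    simp only [List.mem_map] at hj
    obtain ⟨i, hi, rfl⟩ := hj
    exact hkb _ (by omega)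
  have hL1 : ((List.range (k.toNat + 1)).map (keyBucket (p ++ [x]))).flatten =
      ((List.range (k.toNat + 1)).map (keyBucket p)).flatten ++ [x] := by
    rw [List.range_succ, List.map_append, List.map_append, List.flatten_append, List.flatten_append]
    have hlow : (List.range k.toNat).map (keyBucket (p ++ [x])) =
        (List.range k.toNat).map (keyBucket p) := by
      apply List.map_congr_left
      intro j hj
      exact hkb j (by simp only [List.mem_range] at hj; omega)
    rw [hlow]
    have hx : getMonthNumber x = ((k.toNat : Nat) : Int) := by omega
    simp [keyBucket_append, hx]
  rw [hL1, hL2]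
  simp [List.append_assoc]

-- A's fold invariant
theorem foldA (xs : List String) : ∀ p : List String,
    xs.foldl (fun acc x =>
        PySem.List.insertBy (fun a b => decide (getMonthNumber a < getMonthNumber b)) x acc)
      (flatBuckets p) = flatBuckets (p ++ xs) := by
  induction xs with
  | nil => intro p; simp
  | cons x t ih =>
    intro p
    simp only [List.foldl_cons, insert_step p x]
    rw [ih (p ++ [x]), List.append_assoc]
    rfl

theorem flatBuckets_nil : flatBuckets [] = [] := by
  simp [flatBuckets, keyBucket]

-- B's 13 filtering passes produce exactly the bucket concatenation
theorem alt_eq_flatBuckets (p : List String) :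
    sort_months_chronologically_alt p = flatBuckets p := by
  unfold sort_months_chronologically_alt flatBuckets
  have hr : PySem.List.pyRange 0 13 1 = (List.range 13).map (fun j : Nat => (j : Int)) := by decide
  rw [hr]
  rw [List.flatMap_def, List.map_map]
  congr 1
  apply List.map_congr_left
  intro j hj
  simp only [Function.comp]
  rw [List.filter_map]
  simp only [List.map_map, keyBucket]
  have : ∀ s : String,
      ((fun p : Int × String => p.1 == (j : Int)) ∘ fun name => (altMonthNumber name, name)) s =
        decide (getMonthNumber s = (j : Int)) := by
    intro s
    simp only [Function.comp_apply]
    rw [altMonthNumber_eq]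
    by_cases h : getMonthNumber s = (j : Int) <;> simp [h]
  rw [List.filter_congr (fun s _ => this s)]
  have h2 : ((fun p : Int × String => p.2) ∘ fun name => (altMonthNumber name, name)) = id := by
    funext s; rfl
  rw [h2, List.map_id]

-- ===== VERDICT (by name: the statement is the Claim_ definition above) =====
theorem sort_months_chronologically_spec : Claim_equal_sort_months_chronologically := by
  intro month_names _
  unfold Spec_sort_months_chronologically
  rw [alt_eq_flatBuckets]
  unfold sort_months_chronologically
  rw [PySem.List.sorted_eq_foldl_insertBy]
  have := foldA month_names []
  rw [flatBuckets_nil] at this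
  simpa using this
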